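-- pv_equiv track=rewrite | github.com/deadcoast/ctx-card | src/ctxcard_gen/core/scanner.py | longest_prefix_module
-- ===== SOURCE A (Python) =====
-- from typing import Dict, List, Optional, Set, Tuple
--
-- def longest_prefix_module(
--     dotted: str, dotted_to_path: Dict[str, str]
-- ) -> Optional[str]:
--     """Find the longest prefix module for a dotted name."""
--     parts = dotted.split(".")
--     for i in range(len(parts), 0, -1):
--         cand = ".".join(parts[:i])
--         rp = dotted_to_path.get(cand)
--         if rp:
--             return rp
--     return None
-- ===== SOURCE B (Python) =====
-- def longest_prefix_module(dotted, dotted_to_path):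
--     """Find the longest prefix module for a dotted name.
--
--     Single forward pass: build each dotted prefix incrementally
--     (no slicing/joining of a parts list, no backwards range) and
--     remember the value of the last prefix with a truthy mapping.
--     """
--     best = None
--     cand = None
--     for part in dotted.split("."):
--         cand = part if cand is None else cand + "." + part
--         rp = dotted_to_path.get(cand)
--         if rp:
--             best = rp
--     return best
-- ===== Notes on version B (the rewrite author's own statement) =====
-- stated objective: simpler
-- what changed: Instead of generating candidate prefixes longest-to-shortest by slicing and re-joining the parts list and returning on the first truthy hit, B makes one forward pass over the parts, extends the candidate prefix incrementally, and keeps the value of the last (longest) prefix with a truthy mapping.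
import Mathlib
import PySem

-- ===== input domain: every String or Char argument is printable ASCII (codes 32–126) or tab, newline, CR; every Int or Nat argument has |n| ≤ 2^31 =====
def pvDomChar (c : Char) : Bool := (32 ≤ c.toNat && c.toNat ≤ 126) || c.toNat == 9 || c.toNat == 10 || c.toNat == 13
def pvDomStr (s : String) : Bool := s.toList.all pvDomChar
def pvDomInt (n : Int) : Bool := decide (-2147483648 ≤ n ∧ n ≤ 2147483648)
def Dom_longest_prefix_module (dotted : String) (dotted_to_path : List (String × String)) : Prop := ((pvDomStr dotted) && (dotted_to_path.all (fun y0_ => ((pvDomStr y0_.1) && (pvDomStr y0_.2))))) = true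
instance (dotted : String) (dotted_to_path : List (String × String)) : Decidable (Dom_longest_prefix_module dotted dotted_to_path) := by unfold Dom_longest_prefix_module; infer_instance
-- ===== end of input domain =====

-- B replaces A's longest-to-shortest candidate generation (slice + re-join per candidate, return
-- on first truthy hit) by one forward pass that extends the candidate prefix incrementally and
-- keeps the last truthy hit; objective: simpler.

-- ===== PORT A =====
-- loop body of A: 'cand = ".".join(parts[:i]); rp = dotted_to_path.get(cand); if rp: return rp'
def aStep (dotted_to_path : List (String × String)) (parts : List String)
    (acc : Option String) (i : Int) : Option String :=
  match acc with
  | some r => some r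
  | none =>
    let cand := PySem.Str.join "." (PySem.List.slice parts none (some i))
    match PySem.Dict.get? (PySem.Dict.mk dotted_to_path) cand with
    | some rp => if rp = "" then none else some rp
    | none => none

def longest_prefix_module (dotted : String) (dotted_to_path : List (String × String)) : Option String :=
  let parts := (PySem.Str.split? dotted ".").getD []
  (PySem.List.pyRange (parts.length : Int) 0 (-1)).foldl (aStep dotted_to_path parts) none

-- ===== PORT B =====
-- loop body of B: state (cand, best); 'cand = part if cand is None else cand + "." + part;
-- rp = dotted_to_path.get(cand); if rp: best = rp'
def bStep (dotted_to_path : List (String × String))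
    (st : Option String × Option String) (part : String) : Option String × Option String :=
  let cand := match st.1 with
    | none => part
    | some c => c ++ "." ++ part
  let best := match PySem.Dict.get? (PySem.Dict.mk dotted_to_path) cand with
    | some rp => if rp = "" then st.2 else some rp
    | none => st.2
  (some cand, best)

def longest_prefix_module_alt (dotted : String) (dotted_to_path : List (String × String)) : Option String :=
  (((PySem.Str.split? dotted ".").getD []).foldl (bStep dotted_to_path) (none, none)).2

-- ===== PRECONDITION & SPEC =====
def Spec_longest_prefix_module (dotted : String) (dotted_to_path : List (String × String)) (out : Option String) : Prop := out = longest_prefix_module_alt dotted dotted_to_path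
instance (dotted : String) (dotted_to_path : List (String × String)) (out : Option String) : Decidable (Spec_longest_prefix_module dotted dotted_to_path out) := by unfold Spec_longest_prefix_module; infer_instance

-- ===== CLAIM (what is proved, stated in full; the proofs are below) =====
def Claim_equal_longest_prefix_module : Prop := ∀ (dotted : String) (dotted_to_path : List (String × String)), Dom_longest_prefix_module dotted dotted_to_path → Spec_longest_prefix_module dotted dotted_to_path (longest_prefix_module dotted dotted_to_path)

-- ===== LEMMAS AND PROOFS =====

-- '.'.join over a list extended by one element, at the Chars level
theorem chars_join_append_singleton (sep : List Char) (qs : List (List Char)) (p : List Char)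
    (h : qs ≠ []) :
    PySem.Chars.join sep (qs ++ [p]) = PySem.Chars.join sep qs ++ sep ++ p := by
  induction qs with
  | nil => exact absurd rfl h
  | cons q qs ih =>
    cases qs with
    | nil => simp [PySem.Chars.join_cons_cons, PySem.Chars.join_singleton]
    | cons q' rest =>
      have := ih (by simp)
      simp only [List.cons_append, PySem.Chars.join_cons_cons] at this ⊢
      rw [this]
      simp [List.append_assoc]

-- lifted to String
theorem str_join_append_singleton (qs : List String) (p : String) (h : qs ≠ []) :
    PySem.Str.join "." (qs ++ [p]) = PySem.Str.join "." qs ++ "." ++ p := by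
  apply String.toList_inj.mp
  rw [String.toList_append, String.toList_append, PySem.Str.toList_join, PySem.Str.toList_join,
    List.map_append, List.map_singleton]
  exact chars_join_append_singleton ".".toList (qs.map String.toList) p.toList (by simpa using h)

theorem str_join_singleton (p : String) : PySem.Str.join "." [p] = p := by
  apply String.toList_inj.mp
  rw [PySem.Str.toList_join, List.map_singleton]
  exact PySem.Chars.join_singleton ".".toList p.toList

-- A's early-return loop: once the accumulator is 'some', it stays unchanged
theorem aStep_foldl_some (d : List (String × String)) (parts : List String)
    (l : List Int) (r : String) : l.foldl (aStep d parts) (some r) = some r := by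
  induction l with
  | nil => rfl
  | cons x l ih => simpa [aStep] using ih

-- Main invariant, by induction on the parts list from the right:
-- A's backward scan equals B's forward fold, and B's accumulated candidate is the join of all parts.
theorem main_invariant (d : List (String × String)) (ps : List String) :
    (PySem.List.pyRange (ps.length : Int) 0 (-1)).foldl (aStep d ps) none
      = (ps.foldl (bStep d) (none, none)).2
    ∧ (ps.foldl (bStep d) (none, none)).1
      = (if ps = [] then none else some (PySem.Str.join "." ps)) := by
  induction ps using List.reverseRecOn with
  | nil =>
    refine ⟨?_, by simp⟩
    rw [PySem.List.pyRange_neg_one_eq_nil (by simp)]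
    rfl
  | append_singleton qs p ih =>
    obtain ⟨ihA, ihS⟩ := ih
    -- B's incremental candidate after the last step is the join of all parts
    have hc : (match (qs.foldl (bStep d) (none, none)).1 with
        | none => p | some c => c ++ "." ++ p) = PySem.Str.join "." (qs ++ [p]) := by
      by_cases hqs : qs = []
      · rw [ihS, if_pos hqs, hqs]
        simpa using (str_join_singleton p).symm
      · rw [ihS, if_neg hqs]
        simpa using (str_join_append_singleton qs p hqs).symm
    -- A's first candidate is the slice of the whole list, i.e. the join of all parts
    have hslice : PySem.List.slice (qs ++ [p]) none (some ((qs.length : Int) + 1))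
        = qs ++ [p] := by
      rw [PySem.List.slice_to (qs ++ [p]) (show (0:Int) ≤ (qs.length : Int) + 1 by omega)]
      apply List.take_of_length_le
      simp only [List.length_append, List.length_cons, List.length_nil]
      omega
    -- A's remaining candidates only slice within qs
    have hcongr : ∀ (acc : Option String),
        (PySem.List.pyRange (qs.length : Int) 0 (-1)).foldl (aStep d (qs ++ [p])) acc
          = (PySem.List.pyRange (qs.length : Int) 0 (-1)).foldl (aStep d qs) acc := by
      intro acc
      apply PySem.List.foldl_congr_mem
      intro a x hx
      have hx' := PySem.List.mem_pyRange_neg_one.mp hx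
      cases a with
      | some r => rfl
      | none =>
        simp only [aStep]
        rw [PySem.List.slice_to (qs ++ [p]) (show (0:Int) ≤ x by omega),
          PySem.List.slice_to qs (show (0:Int) ≤ x by omega),
          List.take_append_of_le_length (by omega)]
    have hlen1 : ((qs ++ [p]).length : Int) = (qs.length : Int) + 1 := by simp
    have htail : ((qs.length : Int) + 1 - 1) = (qs.length : Int) := by omega
    have hstep1 : aStep d (qs ++ [p]) none ((qs.length : Int) + 1)
        = (match PySem.Dict.get? (PySem.Dict.mk d) (PySem.Str.join "." (qs ++ [p])) with
           | some rp => if rp = "" then none else some rp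
           | none => none) := by
      simp only [aStep, hslice]
    have hstep2 : (bStep d (qs.foldl (bStep d) (none, none)) p).2
        = (match PySem.Dict.get? (PySem.Dict.mk d) (PySem.Str.join "." (qs ++ [p])) with
           | some rp => if rp = "" then (qs.foldl (bStep d) (none, none)).2 else some rp
           | none => (qs.foldl (bStep d) (none, none)).2) := by
      simp only [bStep]
      rw [hc]
    constructor
    · rw [hlen1, PySem.List.pyRange_neg_one_cons (by omega), htail, List.foldl_cons,
        List.foldl_append, List.foldl_cons, List.foldl_nil, hstep1, hstep2]
      rcases hget : PySem.Dict.get? (PySem.Dict.mk d) (PySem.Str.join "." (qs ++ [p]))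
          with _ | rp
      · simpa using (hcongr none).trans ihA
      · by_cases hrp : rp = ""
        · simp only [if_pos hrp]
          exact (hcongr none).trans ihA
        · simp only [if_neg hrp]
          exact aStep_foldl_some d (qs ++ [p]) _ rp
    · rw [List.foldl_append, List.foldl_cons, List.foldl_nil]
      simp only [bStep]
      rw [hc]
      simp

-- ===== VERDICT (by name: the statement is the Claim_ definition above) =====
theorem longest_prefix_module_spec : Claim_equal_longest_prefix_module := by
  intro dotted dotted_to_path _
  unfold Spec_longest_prefix_module longest_prefix_module longest_prefix_module_alt
  exact (main_invariant dotted_to_path ((PySem.Str.split? dotted ".").getD [])).1
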